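-- pv_equiv track=rewrite | github.com/codethat-vivek/Code | LeetCode/Recover a Tree From Preorder Traversal.py | findDashes
-- ===== SOURCE A (Python) =====
-- def findDashes(traversal):
--     dashes, cnt = [0], 0
--     for i in traversal:
--         if i == "-":
--             cnt += 1
--         else:
--             if cnt != 0:dashes.append(cnt)
--             cnt = 0
--     return dashes
-- ===== SOURCE B (Python) =====
-- def findDashes(traversal):
--     # run-length encode the string, then keep the dash runs that are not last
--     groups = []
--     s = traversal
--     while s:
--         c = s[0]
--         k = 1
--         while k < len(s) and s[k] == c:
--             k += 1
--         groups.append((c, k))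
--         s = s[k:]
--     return [0] + [n for ch, n in groups[:-1] if ch == '-']
-- ===== Notes on version B (the rewrite author's own statement) =====
-- stated objective: alternative
-- what changed: Replaces the per-character counter/state machine with a run-length-encoding pass: group the string into maximal runs, drop the last group, and return [0] plus the lengths of the remaining dash runs.
import Mathlib
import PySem

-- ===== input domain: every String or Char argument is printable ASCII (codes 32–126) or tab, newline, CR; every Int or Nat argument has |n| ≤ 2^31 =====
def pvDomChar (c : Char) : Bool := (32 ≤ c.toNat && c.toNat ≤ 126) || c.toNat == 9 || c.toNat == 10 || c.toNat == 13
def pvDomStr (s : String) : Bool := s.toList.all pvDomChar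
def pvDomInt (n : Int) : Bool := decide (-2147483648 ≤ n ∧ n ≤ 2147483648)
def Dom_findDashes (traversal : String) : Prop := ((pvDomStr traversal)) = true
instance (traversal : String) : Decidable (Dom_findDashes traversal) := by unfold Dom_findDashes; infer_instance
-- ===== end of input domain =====

-- B replaces A's per-character counter/state machine by a run-length-encoding pass
-- (group maximal runs, drop the last group, keep lengths of dash runs); same cost.

-- ===== PORT A =====
-- per-character loop over the string, carrying (dashes, cnt)
def findDashesLoop : List Char → List Int → Int → List Int
  | [], dashes, _cnt => dashes
  | i :: rest, dashes, cnt =>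
      if i = '-' then findDashesLoop rest dashes (cnt + 1)
      else findDashesLoop rest (if cnt ≠ 0 then dashes ++ [cnt] else dashes) 0

def findDashes (traversal : String) : List Int :=
  findDashesLoop traversal.toList [0] 0

-- ===== PORT B =====
-- run-length encoding: Source B's inner `while s[k] == c` scan is takeWhile, `s = s[k:]` is dropWhile
def rleB : List Char → List (Char × Nat)
  | [] => []
  | c :: rest =>
      (c, (rest.takeWhile (· == c)).length + 1) :: rleB (rest.dropWhile (· == c))
  termination_by l => l.length
  decreasing_by
    simp only [List.length_cons]
    exact Nat.lt_succ_of_le (List.length_dropWhile_le _ _)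

def findDashes_alt (traversal : String) : List Int :=
  0 :: ((rleB traversal.toList).dropLast.filter (fun p => p.1 == '-')).map
        (fun p => (p.2 : Int))

-- ===== PRECONDITION & SPEC =====
def Spec_findDashes (traversal : String) (out : List Int) : Prop := out = findDashes_alt traversal
instance (traversal : String) (out : List Int) : Decidable (Spec_findDashes traversal out) := by unfold Spec_findDashes; infer_instance

-- ===== CLAIM (what is proved, stated in full; the proofs are below) =====
def Claim_equal_findDashes : Prop := ∀ (traversal : String), Dom_findDashes traversal → Spec_findDashes traversal (findDashes traversal)

-- ===== LEMMAS AND PROOFS =====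

-- what A's loop will still emit, given the pending dash count n and the rest of the chars
def emitB (n : Nat) : List Char → List Int
  | [] => []
  | c :: rest =>
      if c = '-' then emitB (n + 1) rest
      else (if n ≠ 0 then [(n : Int)] else []) ++ emitB 0 rest

-- shorthand for B's post-processing of the run list
def pickB (g : List (Char × Nat)) : List Int :=
  (g.dropLast.filter (fun p => p.1 == '-')).map (fun p => (p.2 : Int))

theorem loopA_eq (l : List Char) : ∀ (ds : List Int) (n : Nat),
    findDashesLoop l ds (n : Int) = ds ++ emitB n l := by
  induction l with
  | nil => intro ds n; simp [findDashesLoop, emitB]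
  | cons c rest ih =>
    intro ds n
    by_cases hc : c = '-'
    · have hcast : ((n : Int) + 1) = ((n + 1 : Nat) : Int) := by push_cast; ring
      rw [findDashesLoop, if_pos hc, hcast, ih ds (n + 1)]
      simp [emitB, hc]
    · by_cases hn : n = 0
      · subst hn
        rw [findDashesLoop, if_neg hc]
        have h0 := ih ds 0
        simp only [Nat.cast_zero] at h0
        simp [h0, emitB, hc]
      · have hni : ((n : Int)) ≠ 0 := Int.natCast_ne_zero.mpr hn
        rw [findDashesLoop, if_neg hc, if_pos hni]
        have h0 := ih (ds ++ [(n : Int)]) 0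
        simp only [Nat.cast_zero] at h0
        simp [h0, emitB, hc, hn]

theorem emitB_nonDash (r : List Char) (t : List Char)
    (h : ∀ x ∈ r, x ≠ '-') : emitB 0 (r ++ t) = emitB 0 t := by
  induction r with
  | nil => rfl
  | cons c r ih =>
    have hc : c ≠ '-' := h c (by simp)
    simp [emitB, hc, ih (fun x hx => h x (by simp [hx]))]

theorem emitB_dash (r : List Char) : ∀ (n : Nat) (t : List Char),
    (∀ x ∈ r, x = '-') → emitB n (r ++ t) = emitB (n + r.length) t := by
  induction r with
  | nil => intro n t _; rfl
  | cons c r ih =>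
    intro n t h
    have hc : c = '-' := h c (by simp)
    have h2 := ih (n + 1) t (fun x hx => h x (by simp [hx]))
    have h3 : n + 1 + r.length = n + (r.length + 1) := by omega
    rw [h3] at h2
    simp [emitB, hc, h2]

theorem dropWhile_head_not {p : Char → Bool} {l : List Char} {c : Char} {t : List Char}
    (h : l.dropWhile p = c :: t) : p c = false := by
  induction l with
  | nil => simp at h
  | cons a l ih =>
    by_cases hp : p a
    · exact ih (by simpa [List.dropWhile, hp] using h)
    · simp [List.dropWhile, hp] at h
      rcases h with ⟨h1, _⟩
      subst h1
      simpa using hp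

theorem rleB_ne_nil (c : Char) (rest : List Char) : rleB (c :: rest) ≠ [] := by
  rw [rleB]; simp

theorem emitB_eq_pickB (l : List Char) : emitB 0 l = pickB (rleB l) := by
  induction l using rleB.induct with
  | case1 => simp [emitB, pickB, rleB]
  | case2 c rest ih =>
    rw [rleB]
    set run := rest.takeWhile (· == c) with hrun
    set rest' := rest.dropWhile (· == c) with hrest'
    have hsplit : run ++ rest' = rest := List.takeWhile_append_dropWhile
    by_cases hc : c = '-'
    · subst hc
      have hall : ∀ x ∈ run, x = '-' := by
        intro x hx
        have := List.mem_takeWhile_imp (hrun ▸ hx)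
        simpa using this
      have h1 : emitB 0 ('-' :: rest) = emitB (1 + run.length) rest' := by
        have := emitB_dash run 1 rest' hall
        simpa [emitB, hsplit] using this
      cases hrest'' : rest' with
      | nil =>
        rw [h1, hrest'']
        simp [emitB, pickB, rleB]
      | cons c' t =>
        have hc' : (c' == '-') = false :=
          dropWhile_head_not (p := fun x => x == '-') (c := c') (t := t)
            (hrest'.symm.trans hrest'')
        have hc'' : c' ≠ '-' := by simpa using hc'
        have hk : emitB (1 + run.length) (c' :: t)
            = ((run.length + 1 : Nat) : Int) :: emitB 0 t := by
          have h3 : 1 + run.length = run.length + 1 := by omega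
          simp [emitB, hc'', h3]
        have h0 : emitB 0 rest' = emitB 0 t := by
          rw [hrest'']; simp [emitB, hc'']
        have hne : rleB rest' ≠ [] := by
          rw [hrest'']; exact rleB_ne_nil _ _
        obtain ⟨x, xs, hx⟩ := List.exists_cons_of_ne_nil hne
        have hrec : emitB 0 t = pickB (rleB rest') := h0 ▸ ih
        rw [h1, hrest'', hk, hrec, ← hrest'', hx]
        simp [pickB, List.dropLast_cons_of_ne_nil (by simp : (x :: xs : List (Char × Nat)) ≠ [])]
    · have hall : ∀ x ∈ run, x ≠ '-' := by
        intro x hx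
        have := List.mem_takeWhile_imp (hrun ▸ hx)
        have hxc : x = c := by simpa using this
        simpa [hxc] using hc
      have h1 : emitB 0 (c :: rest) = emitB 0 rest' := by
        have := emitB_nonDash run rest' hall
        simpa [emitB, hc, hsplit] using this
      have hcb : (c == '-') = false := by simpa using hc
      cases hg : rleB rest' with
      | nil =>
        have hrn : rest' = [] := by
          cases hrest'' : rest' with
          | nil => rfl
          | cons a b => exact absurd (hrest'' ▸ hg) (rleB_ne_nil a b)
        rw [h1, hrn]
        simp [emitB, pickB]
      | cons x xs =>
        rw [h1, ih, hg]
        simp [pickB, List.dropLast_cons_of_ne_nil (by simp : (x :: xs : List (Char × Nat)) ≠ []), hcb]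

-- ===== VERDICT (by name: the statement is the Claim_ definition above) =====
theorem findDashes_spec : Claim_equal_findDashes := by
  intro traversal _
  show findDashes traversal = findDashes_alt traversal
  unfold findDashes findDashes_alt
  have h := loopA_eq traversal.toList [0] 0
  simp only [Nat.cast_zero] at h
  rw [h, emitB_eq_pickB]
  simp [pickB]
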